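-- pv_equiv track=rewrite | github.com/ctrueden/puzzler | seating-charts/classroom.py | there_are_bad_pairs
-- ===== SOURCE A (Python) =====
-- def there_are_bad_pairs(chart, bad_pairs):
--     cols = len(chart)
--     rows = len(chart[0])
--     for c in range(cols):
--         for r in range(rows):
--             if c and bad_pair(bad_pairs, chart[c][r], chart[c - 1][r]) or \
--                r and bad_pair(bad_pairs, chart[c][r], chart[c][r - 1]) or \
--                c and r and bad_pair(bad_pairs, chart[c][r], chart[c - 1][r - 1]) or \
--                c and r < rows - 1 and bad_pair(bad_pairs, chart[c][r], chart[c - 1][r + 1]):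
--                 return True
--     return False
--
-- def bad_pair(bad_pairs, s1, s2):
--     return s1 in bad_pairs and s2 in bad_pairs[s1] or \
--            s2 in bad_pairs and s1 in bad_pairs[s2]
-- ===== SOURCE B (Python) =====
-- def there_are_bad_pairs(chart, bad_pairs):
--     rows = len(chart[0])
--     pos = {}
--     for c in range(len(chart)):
--         for r in range(rows):
--             pos.setdefault(chart[c][r], []).append((c, r))
--     for s1, enemies in bad_pairs.items():
--         for s2 in enemies:
--             for c1, r1 in pos.get(s1, ()):
--                 for c2, r2 in pos.get(s2, ()):
--                     if max(abs(c1 - c2), abs(r1 - r2)) == 1: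
--                         return True
--     return False
-- ===== Notes on version B (the rewrite author's own statement) =====
-- stated objective: alternative
-- what changed: A scans every seat and probes its four earlier neighbours against the conflict dict; B builds a name-to-positions index in one pass over the chart and then iterates the conflict relation itself, testing Chebyshev distance 1 between indexed positions.
-- outside the precondition, e.g. on there_are_bad_pairs([['', '0', ' z '], ['']], {'': ['zzb10by', '']}): A returns True, B raises IndexError
import Mathlib
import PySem

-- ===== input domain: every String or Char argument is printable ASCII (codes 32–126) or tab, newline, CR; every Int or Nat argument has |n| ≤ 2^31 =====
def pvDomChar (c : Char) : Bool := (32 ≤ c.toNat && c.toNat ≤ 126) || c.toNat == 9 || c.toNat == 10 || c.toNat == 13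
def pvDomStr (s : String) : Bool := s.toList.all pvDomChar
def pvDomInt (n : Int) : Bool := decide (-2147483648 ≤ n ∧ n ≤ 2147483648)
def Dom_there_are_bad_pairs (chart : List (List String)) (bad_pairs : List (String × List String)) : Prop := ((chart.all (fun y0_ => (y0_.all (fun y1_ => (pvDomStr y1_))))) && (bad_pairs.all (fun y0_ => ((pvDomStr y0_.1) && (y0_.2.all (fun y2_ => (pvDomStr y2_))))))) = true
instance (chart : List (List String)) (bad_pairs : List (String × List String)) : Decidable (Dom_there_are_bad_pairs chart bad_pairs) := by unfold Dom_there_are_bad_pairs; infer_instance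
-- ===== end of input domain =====

-- B replaces A's grid scan (four earlier-neighbour probes per seat) by a one-pass position
-- index (name → list of seats) followed by a scan of the conflict relation itself, testing
-- Chebyshev distance 1 between indexed positions (objective: alternative).

-- chart[c][r] (used by both ports; on Pre_ the indices are in range, the default never returned)
def pvCell (chart : List (List String)) (c r : Nat) : String := (chart.getD c []).getD r ""

-- ===== PORT A =====
-- bad_pair: s1 in bad_pairs and s2 in bad_pairs[s1] or s2 in bad_pairs and s1 in bad_pairs[s2]
def pvBadPair (bad_pairs : List (String × List String)) (s1 s2 : String) : Bool :=
  (match (PySem.Dict.mk bad_pairs).get? s1 with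
   | some l => l.contains s2
   | none => false) ||
  (match (PySem.Dict.mk bad_pairs).get? s2 with
   | some l => l.contains s1
   | none => false)

def there_are_bad_pairs (chart : List (List String)) (bad_pairs : List (String × List String)) : Bool :=
  -- cols = len(chart); rows = len(chart[0])  (chart ≠ [] on Pre_)
  let rows := (chart.getD 0 []).length
  (List.range chart.length).any fun c =>
    (List.range rows).any fun r =>
      (decide (c ≠ 0) && pvBadPair bad_pairs (pvCell chart c r) (pvCell chart (c - 1) r)) ||
      (decide (r ≠ 0) && pvBadPair bad_pairs (pvCell chart c r) (pvCell chart c (r - 1))) ||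
      (decide (c ≠ 0) && decide (r ≠ 0) && pvBadPair bad_pairs (pvCell chart c r) (pvCell chart (c - 1) (r - 1))) ||
      (decide (c ≠ 0) && decide (r < rows - 1) && pvBadPair bad_pairs (pvCell chart c r) (pvCell chart (c - 1) (r + 1)))

-- ===== PORT B =====
-- pos = {}; for c in range(len(chart)): for r in range(rows): pos.setdefault(chart[c][r], []).append((c, r))
def pvPositions (chart : List (List String)) : PySem.Dict String (List (Nat × Nat)) :=
  (List.range chart.length).foldl (fun d c =>
    (List.range (chart.getD 0 []).length).foldl (fun d r =>
      d.modify (pvCell chart c r) [] (· ++ [(c, r)])) d) PySem.Dict.empty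

def there_are_bad_pairs_alt (chart : List (List String)) (bad_pairs : List (String × List String)) : Bool :=
  let pos := pvPositions chart
  bad_pairs.any fun q =>
    q.2.any fun s2 =>
      (pos.getD q.1 []).any fun p1 =>
        (pos.getD s2 []).any fun p2 =>
          max ((p1.1 : Int) - p2.1).natAbs ((p1.2 : Int) - p2.2).natAbs == 1

-- ===== PRECONDITION & SPEC =====
-- Pre_ excludes exactly: (a) the empty chart (A raises IndexError on chart[0]) and charts
-- with a column shorter than chart[0] (rows = len(chart[0])): A raises IndexError there
-- unless its scan happens to hit a bad pair first, while B's index pass touches every seat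
-- and always raises; and (b) association lists with duplicate keys, which a Python dict can
-- never contain (first-match vs every-entry lookup there is nobody's specified behaviour).
def Pre_there_are_bad_pairs (chart : List (List String)) (bad_pairs : List (String × List String)) : Prop :=
  chart ≠ [] ∧ (∀ col ∈ chart, (chart.getD 0 []).length ≤ col.length) ∧
    (bad_pairs.map Prod.fst).Nodup
instance (chart : List (List String)) (bad_pairs : List (String × List String)) : Decidable (Pre_there_are_bad_pairs chart bad_pairs) := by unfold Pre_there_are_bad_pairs; infer_instance

def pvWitness_there_are_bad_pairs : List (List String) × (List (String × List String)) :=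
  ([["ann", "bob"], ["cid", "dee"]], [("ann", ["dee"])])

def Spec_there_are_bad_pairs (chart : List (List String)) (bad_pairs : List (String × List String)) (out : Bool) : Prop := out = there_are_bad_pairs_alt chart bad_pairs
instance (chart : List (List String)) (bad_pairs : List (String × List String)) (out : Bool) : Decidable (Spec_there_are_bad_pairs chart bad_pairs out) := by unfold Spec_there_are_bad_pairs; infer_instance

-- ===== CLAIM (what is proved, stated in full; the proofs are below) =====
def Claim_equal_there_are_bad_pairs : Prop := ∀ (chart : List (List String)) (bad_pairs : List (String × List String)), Dom_there_are_bad_pairs chart bad_pairs → Pre_there_are_bad_pairs chart bad_pairs → Spec_there_are_bad_pairs chart bad_pairs (there_are_bad_pairs chart bad_pairs)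

-- ===== LEMMAS AND PROOFS =====

-- "some entry (s, l) of bad_pairs lists t": the relation both ports test
def pvBadB (bad_pairs : List (String × List String)) (s t : String) : Prop :=
  ∃ q ∈ bad_pairs, q.1 = s ∧ t ∈ q.2

-- two conflicting seats are Chebyshev-adjacent: the common meaning of both programs
def pvAdjBad (chart : List (List String)) (bad_pairs : List (String × List String)) : Prop :=
  ∃ c1 r1 c2 r2 : Nat, c1 < chart.length ∧ r1 < (chart.getD 0 []).length ∧
    c2 < chart.length ∧ r2 < (chart.getD 0 []).length ∧
    max ((c1 : Int) - c2).natAbs ((r1 : Int) - r2).natAbs = 1 ∧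
    pvBadB bad_pairs (pvCell chart c1 r1) (pvCell chart c2 r2)

lemma pvLookup_iff (bad_pairs : List (String × List String)) (s t : String)
    (hnd : (bad_pairs.map Prod.fst).Nodup) :
    ((match (PySem.Dict.mk bad_pairs).get? s with
      | some l => l.contains t
      | none => false) = true) ↔ pvBadB bad_pairs s t := by
  have hk : (PySem.Dict.mk bad_pairs).keys.Nodup := by simpa [PySem.Dict.keys_mk] using hnd
  unfold pvBadB
  rcases h : (PySem.Dict.mk bad_pairs).get? s with _ | l
  · simp only [Bool.false_eq_true, false_iff]
    rintro ⟨⟨k, v⟩, hq, rfl, ht⟩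
    have := (PySem.Dict.get?_eq_some_iff_mem_items (PySem.Dict.mk bad_pairs) k v hk).2 hq
    simp [this] at h
  · rw [PySem.Dict.get?_eq_some_iff_mem_items _ _ _ hk] at h
    simp only [List.contains_iff_mem]
    constructor
    · intro ht; exact ⟨(s, l), h, rfl, by simpa using ht⟩
    · rintro ⟨⟨k, v⟩, hq, rfl, ht⟩
      have h2 := (PySem.Dict.get?_eq_some_iff_mem_items (PySem.Dict.mk bad_pairs) k v hk).2 hq
      have h1 := (PySem.Dict.get?_eq_some_iff_mem_items (PySem.Dict.mk bad_pairs) k l hk).2 h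
      rw [h1] at h2
      simpa [Option.some_inj.1 h2] using ht

lemma pvBadPair_iff (bad_pairs : List (String × List String)) (s t : String)
    (hnd : (bad_pairs.map Prod.fst).Nodup) :
    pvBadPair bad_pairs s t = true ↔ pvBadB bad_pairs s t ∨ pvBadB bad_pairs t s := by
  unfold pvBadPair
  rw [Bool.or_eq_true, pvLookup_iff _ _ _ hnd, pvLookup_iff _ _ _ hnd]

-- the nested index loops of pvPositions, flattened to one fold over (key, seat) pairs
lemma pvPositions_eq (chart : List (List String)) :
    pvPositions chart =
      (((List.range chart.length).flatMap (fun c =>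
        (List.range (chart.getD 0 []).length).map (fun r => (pvCell chart c r, (c, r))))).foldl
        (fun d q => d.modify q.1 [] (· ++ [q.2])) PySem.Dict.empty) := by
  rw [List.foldl_flatMap]
  simp only [List.foldl_map, pvPositions]

lemma pvMem_positions (chart : List (List String)) (s : String) (p : Nat × Nat) :
    p ∈ (pvPositions chart).getD s [] ↔
      p.1 < chart.length ∧ p.2 < (chart.getD 0 []).length ∧ pvCell chart p.1 p.2 = s := by
  rw [pvPositions_eq, PySem.Dict.getD_foldl_modify_append]
  simp only [PySem.Dict.getD_empty, List.nil_append, List.mem_map, List.mem_filter,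
    List.mem_flatMap, List.mem_range, beq_iff_eq]
  constructor
  · rintro ⟨⟨k, c, r⟩, ⟨⟨c', hc', hm⟩, hk⟩, rfl⟩
    simp only [Prod.mk.injEq] at hm
    rcases hm with ⟨r', hr', hkeq, rfl, rfl⟩
    exact ⟨hc', hr', hkeq.trans hk⟩
  · rintro ⟨hc, hr, hs⟩
    refine ⟨(s, p), ⟨⟨p.1, hc, ?_⟩, rfl⟩, rfl⟩
    simp only [Prod.mk.injEq]
    exact ⟨p.2, hr, hs, rfl⟩

lemma pvB_iff (chart : List (List String)) (bad_pairs : List (String × List String)) :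
    there_are_bad_pairs_alt chart bad_pairs = true ↔ pvAdjBad chart bad_pairs := by
  simp only [there_are_bad_pairs_alt, List.any_eq_true, pvMem_positions, beq_iff_eq]
  constructor
  · rintro ⟨q, hq, s2, hs2, p1, ⟨hc1, hr1, hs1⟩, p2, ⟨hc2, hr2, hcell2⟩, hmax⟩
    exact ⟨p1.1, p1.2, p2.1, p2.2, hc1, hr1, hc2, hr2, hmax,
      q, hq, hs1.symm ▸ rfl, by rw [hcell2]; exact hs2⟩
  · rintro ⟨c1, r1, c2, r2, hc1, hr1, hc2, hr2, hmax, q, hq, hq1, hq2⟩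
    exact ⟨q, hq, pvCell chart c2 r2, hq2, (c1, r1), ⟨hc1, hr1, hq1.symm⟩,
      (c2, r2), ⟨hc2, hr2, rfl⟩, hmax⟩

lemma pvA_iff (chart : List (List String)) (bad_pairs : List (String × List String))
    (hnd : (bad_pairs.map Prod.fst).Nodup) :
    there_are_bad_pairs chart bad_pairs = true ↔ pvAdjBad chart bad_pairs := by
  simp only [there_are_bad_pairs, List.any_eq_true, List.mem_range, Bool.or_eq_true,
    Bool.and_eq_true, decide_eq_true_eq, pvBadPair_iff _ _ _ hnd]
  constructor
  · rintro ⟨c, hc, r, hr, hd⟩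
    rcases hd with ((⟨hc0, hb | hb⟩ | ⟨hr0, hb | hb⟩) | ⟨⟨hc0, hr0⟩, hb | hb⟩) | ⟨⟨hc0, hrlt⟩, hb | hb⟩
    · exact ⟨c, r, c - 1, r, hc, hr, by omega, hr, by omega, hb⟩
    · exact ⟨c - 1, r, c, r, by omega, hr, hc, hr, by omega, hb⟩
    · exact ⟨c, r, c, r - 1, hc, hr, hc, by omega, by omega, hb⟩
    · exact ⟨c, r - 1, c, r, hc, by omega, hc, hr, by omega, hb⟩
    · exact ⟨c, r, c - 1, r - 1, hc, hr, by omega, by omega, by omega, hb⟩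
    · exact ⟨c - 1, r - 1, c, r, by omega, by omega, hc, hr, by omega, hb⟩
    · exact ⟨c, r, c - 1, r + 1, hc, hr, by omega, by omega, by omega, hb⟩
    · exact ⟨c - 1, r + 1, c, r, by omega, by omega, hc, hr, by omega, hb⟩
  · rintro ⟨c1, r1, c2, r2, hc1, hr1, hc2, hr2, hmax, hbad⟩
    rcases Nat.lt_trichotomy c1 c2 with hcc | hcc | hcc
    · -- c1 < c2 : take A's cell (c2, r2), relation swapped
      rcases Nat.lt_trichotomy r1 r2 with hrr | hrr | hrr
      · refine ⟨c2, hc2, r2, hr2, Or.inl (Or.inr ⟨⟨by omega, by omega⟩, Or.inr ?_⟩)⟩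
        have e1 : c2 - 1 = c1 := by omega
        have e2 : r2 - 1 = r1 := by omega
        rw [e1, e2]; exact hbad
      · refine ⟨c2, hc2, r2, hr2, Or.inl (Or.inl (Or.inl ⟨by omega, Or.inr ?_⟩))⟩
        have e1 : c2 - 1 = c1 := by omega
        rw [e1, ← hrr]; rwa [← hrr] at hbad
      · refine ⟨c2, hc2, r2, hr2, Or.inr ⟨⟨by omega, by omega⟩, Or.inr ?_⟩⟩
        have e1 : c2 - 1 = c1 := by omega
        have e2 : r2 + 1 = r1 := by omega
        rw [e1, e2]; exact hbad
    · -- same column: the lower seat is A's cell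
      rcases Nat.lt_trichotomy r1 r2 with hrr | hrr | hrr
      · refine ⟨c2, hc2, r2, hr2, Or.inl (Or.inl (Or.inr ⟨by omega, Or.inr ?_⟩))⟩
        have e2 : r2 - 1 = r1 := by omega
        rw [e2, ← hcc]; rwa [← hcc] at hbad
      · omega
      · refine ⟨c1, hc1, r1, hr1, Or.inl (Or.inl (Or.inr ⟨by omega, Or.inl ?_⟩))⟩
        have e2 : r1 - 1 = r2 := by omega
        rw [e2]; rwa [← hcc] at hbad
    · -- c2 < c1 : take A's cell (c1, r1), relation direct
      rcases Nat.lt_trichotomy r1 r2 with hrr | hrr | hrr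
      · refine ⟨c1, hc1, r1, hr1, Or.inr ⟨⟨by omega, by omega⟩, Or.inl ?_⟩⟩
        have e1 : c1 - 1 = c2 := by omega
        have e2 : r1 + 1 = r2 := by omega
        rw [e1, e2]; exact hbad
      · refine ⟨c1, hc1, r1, hr1, Or.inl (Or.inl (Or.inl ⟨by omega, Or.inl ?_⟩))⟩
        have e1 : c1 - 1 = c2 := by omega
        rw [e1, hrr]; rwa [hrr] at hbad
      · refine ⟨c1, hc1, r1, hr1, Or.inl (Or.inr ⟨⟨by omega, by omega⟩, Or.inl ?_⟩)⟩
        have e1 : c1 - 1 = c2 := by omega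
        have e2 : r1 - 1 = r2 := by omega
        rw [e1, e2]; exact hbad

-- ===== VERDICT (by name: the statement is the Claim_ definition above) =====
theorem there_are_bad_pairs_spec : Claim_equal_there_are_bad_pairs := by
  intro chart bad_pairs _ hpre
  unfold Spec_there_are_bad_pairs
  rw [Bool.eq_iff_iff, pvA_iff chart bad_pairs hpre.2.2, pvB_iff]
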